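-- pv_equiv track=rewrite | github.com/eole-nlp/eole | apps/eole-translator.py | rebuild_text
-- ===== SOURCE A (Python) =====
-- def rebuild_text(translated_sentences, breaks):
--     result = []
--     s_idx = b_idx = 0
--     while s_idx < len(translated_sentences) or b_idx < len(breaks):
--         if s_idx < len(translated_sentences):
--             result.append(translated_sentences[s_idx])
--             s_idx += 1
--         if b_idx < len(breaks):
--             result.append(breaks[b_idx])
--             b_idx += 1
--     return "".join(result)
-- ===== SOURCE B (Python) =====
-- def rebuild_text(translated_sentences, breaks):
--     n = min(len(translated_sentences), len(breaks))
--     paired = "".join(s + b for s, b in zip(translated_sentences, breaks))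
--     return paired + "".join(translated_sentences[n:]) + "".join(breaks[n:])
-- ===== Notes on version B (the rewrite author's own statement) =====
-- stated objective: alternative
-- what changed: Replaces A's two-pointer while loop with a staged construction: join the zipped common prefix pairwise, then append the sliced-off tail of whichever list is longer.
import Mathlib
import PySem

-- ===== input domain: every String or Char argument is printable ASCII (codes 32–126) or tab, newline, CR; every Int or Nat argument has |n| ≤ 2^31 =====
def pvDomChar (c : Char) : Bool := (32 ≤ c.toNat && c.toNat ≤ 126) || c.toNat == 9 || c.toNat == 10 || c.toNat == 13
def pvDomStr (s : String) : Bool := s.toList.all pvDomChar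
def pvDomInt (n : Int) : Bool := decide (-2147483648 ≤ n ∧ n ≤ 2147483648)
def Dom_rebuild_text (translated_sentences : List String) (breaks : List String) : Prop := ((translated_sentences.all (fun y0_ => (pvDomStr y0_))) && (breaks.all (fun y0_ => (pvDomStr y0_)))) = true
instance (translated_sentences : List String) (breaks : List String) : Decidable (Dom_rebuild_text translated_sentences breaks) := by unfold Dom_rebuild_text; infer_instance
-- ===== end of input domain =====

-- B builds the result in stages (zipped common prefix, then each sliced tail) instead of A's two-pointer while loop; same cost, different decomposition.
-- ===== PORT A =====
-- the while loop over s_idx/b_idx, as structural recursion over the remaining suffixes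
def rebuildLoopA : List String → List String → List String
  | [], [] => []
  | s :: ss, [] => s :: rebuildLoopA ss []
  | [], b :: bs => b :: rebuildLoopA [] bs
  | s :: ss, b :: bs => s :: b :: rebuildLoopA ss bs

def rebuild_text (translated_sentences : List String) (breaks : List String) : String :=
  String.join (rebuildLoopA translated_sentences breaks)

-- ===== PORT B =====
-- n = min of the lengths; zip + pairwise concat for the common prefix; xs[n:] with 0 ≤ n is exactly List.drop n
def rebuild_text_alt (translated_sentences : List String) (breaks : List String) : String :=
  let n := min translated_sentences.length breaks.length
  String.join ((translated_sentences.zip breaks).map (fun p => p.1 ++ p.2))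
    ++ String.join (translated_sentences.drop n)
    ++ String.join (breaks.drop n)

-- ===== PRECONDITION & SPEC =====
def Spec_rebuild_text (translated_sentences : List String) (breaks : List String) (out : String) : Prop := out = rebuild_text_alt translated_sentences breaks
instance (translated_sentences : List String) (breaks : List String) (out : String) : Decidable (Spec_rebuild_text translated_sentences breaks out) := by unfold Spec_rebuild_text; infer_instance

-- ===== CLAIM (what is proved, stated in full; the proofs are below) =====
def Claim_equal_rebuild_text : Prop := ∀ (translated_sentences : List String) (breaks : List String), Dom_rebuild_text translated_sentences breaks → Spec_rebuild_text translated_sentences breaks (rebuild_text translated_sentences breaks)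

-- ===== LEMMAS AND PROOFS =====
theorem loopA_nil_right (ts : List String) : rebuildLoopA ts [] = ts := by
  induction ts with
  | nil => simp [rebuildLoopA]
  | cons s ss ih => simp [rebuildLoopA, ih]

theorem loopA_nil_left (bs : List String) : rebuildLoopA [] bs = bs := by
  induction bs with
  | nil => simp [rebuildLoopA]
  | cons b bs ih => simp [rebuildLoopA, ih]

theorem foldl_append_init (a : String) (l : List String) :
    List.foldl (fun r s => r ++ s) a l = a ++ String.join l := by
  induction l generalizing a with
  | nil => simp [String.join]
  | cons x xs ih =>
    have jc : String.join (x :: xs) = x ++ String.join xs := by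
      simp only [String.join, List.foldl]
      rw [ih ("" ++ x)]
      rw [show ("" : String) ++ x = x by simp]
      rfl
    simp only [List.foldl]
    rw [ih (a ++ x), jc, String.append_assoc]

theorem join_loopA (ts bs : List String) :
    String.join (rebuildLoopA ts bs) =
      String.join ((ts.zip bs).map (fun p => p.1 ++ p.2))
        ++ String.join (ts.drop (min ts.length bs.length))
        ++ String.join (bs.drop (min ts.length bs.length)) := by
  induction ts generalizing bs with
  | nil => simp [loopA_nil_left, String.join]
  | cons s ss ih =>
    cases bs with
    | nil => simp [loopA_nil_right, String.join]
    | cons b bs =>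
      simp only [rebuildLoopA, String.join, List.foldl, List.zip_cons_cons, List.map_cons,
        List.length_cons, Nat.succ_min_succ, List.drop_succ_cons]
      rw [foldl_append_init, foldl_append_init, ih bs]
      simp [String.join, String.append_assoc]

-- ===== VERDICT (by name: the statement is the Claim_ definition above) =====
theorem rebuild_text_spec : Claim_equal_rebuild_text := by
  intro ts bs _
  unfold Spec_rebuild_text rebuild_text rebuild_text_alt
  exact join_loopA ts bs
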